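-- pv_equiv track=rewrite | github.com/zwg19941024/ros2nav2 | Ros_ws/Nav2_ws/src/isaac_nav2/isaac_nav2/realsenseD435.py | _set_bitrate
-- ===== SOURCE A (Python) =====
-- def _set_bitrate(sdp, br):
--     lines = sdp.splitlines()
--     idx = next((i for i, l in enumerate(lines) if l.startswith("m=video")), -1)
--     if idx != -1:
--         i = idx + 1
--         while i < len(lines) and lines[i].startswith("b="): lines.pop(i)
--         lines.insert(i, f"b=TIAS:{br*1000}")
--         lines.insert(i+1, f"b=AS:{br}")
--     return "\r\n".join(lines)
-- ===== SOURCE B (Python) =====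
-- def _set_bitrate(sdp, br):
--     out = []
--     handled = False
--     skipping = False
--     for line in sdp.splitlines():
--         if skipping and line.startswith("b="):
--             continue
--         skipping = False
--         out.append(line)
--         if not handled and line.startswith("m=video"):
--             out.append(f"b=TIAS:{br*1000}")
--             out.append(f"b=AS:{br}")
--             handled = True
--             skipping = True
--     return "\r\n".join(out)
-- ===== Notes on version B (the rewrite author's own statement) =====
-- stated objective: alternative
-- what changed: Replaces A's find-index-then-mutate-in-place (pop loop + two inserts at computed indices) by a single forward pass with handled/skipping flags that builds a fresh output list, appending the two bitrate lines right after the first m=video line and skipping its contiguous b= run.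
import Mathlib
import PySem

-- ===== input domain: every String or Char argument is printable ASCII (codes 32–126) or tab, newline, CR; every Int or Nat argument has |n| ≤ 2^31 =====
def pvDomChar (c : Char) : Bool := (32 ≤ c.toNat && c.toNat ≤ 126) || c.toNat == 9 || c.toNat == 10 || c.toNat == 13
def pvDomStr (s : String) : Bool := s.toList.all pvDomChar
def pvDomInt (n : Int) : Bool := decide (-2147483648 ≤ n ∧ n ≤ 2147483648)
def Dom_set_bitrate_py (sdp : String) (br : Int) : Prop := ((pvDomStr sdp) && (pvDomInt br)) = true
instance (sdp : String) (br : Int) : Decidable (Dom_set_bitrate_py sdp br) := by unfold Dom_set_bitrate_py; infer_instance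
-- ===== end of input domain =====

-- B replaces A's find-index / in-place pop-and-insert surgery by one forward pass with
-- handled/skipping flags building a fresh output list (objective: alternative decomposition).

-- ===== PORT A =====
-- next((i for i, l in enumerate(lines) if l.startswith("m=video")), -1)
def pvNextIdx (lines : List String) (i : Int) : Int :=
  match lines with
  | [] => -1
  | l :: rest => if PySem.Str.startswith l "m=video" then i else pvNextIdx rest (i + 1)

-- while i < len(lines) and lines[i].startswith("b="): lines.pop(i)
def pvPopLoop (lines : List String) (i : Int) : List String :=
  if i < (lines.length : Int) ∧
      (match PySem.List.pyGet? lines i with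
       | some l => PySem.Str.startswith l "b="
       | none => false) = true then
    match hp : PySem.List.pop? lines i with
    | some (_, rest) => pvPopLoop rest i
    | none => lines   -- unreachable: the guard ensures the index is valid
  else lines
termination_by lines.length
decreasing_by
  have := PySem.List.length_of_pop?_eq_some lines hp
  simp at this
  omega

def set_bitrate_py (sdp : String) (br : Int) : String :=
  let lines := PySem.Str.splitlines sdp
  let idx := pvNextIdx lines 0
  let lines :=
    if idx ≠ -1 then
      let i := idx + 1
      let lines := pvPopLoop lines i
      let lines := PySem.List.insert lines i ("b=TIAS:" ++ PySem.Int.toStr (br * 1000))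
      PySem.List.insert lines (i + 1) ("b=AS:" ++ PySem.Int.toStr br)
    else lines
  PySem.Str.join "\r\n" lines

-- ===== PORT B =====
-- one step of B's loop over the lines; state = (out, handled, skipping)
def pvAltStep (tias asl : String) (st : List String × Bool × Bool) (line : String) :
    List String × Bool × Bool :=
  if st.2.2 && PySem.Str.startswith line "b=" then st
  else
    let out := st.1 ++ [line]
    if !st.2.1 && PySem.Str.startswith line "m=video" then
      (out ++ [tias, asl], true, true)
    else
      (out, st.2.1, false)

def set_bitrate_py_alt (sdp : String) (br : Int) : String :=
  let tias := "b=TIAS:" ++ PySem.Int.toStr (br * 1000)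
  let asl := "b=AS:" ++ PySem.Int.toStr br
  let st := (PySem.Str.splitlines sdp).foldl (pvAltStep tias asl) ([], false, false)
  PySem.Str.join "\r\n" st.1

-- ===== PRECONDITION & SPEC =====
def Spec_set_bitrate_py (sdp : String) (br : Int) (out : String) : Prop := out = set_bitrate_py_alt sdp br
instance (sdp : String) (br : Int) (out : String) : Decidable (Spec_set_bitrate_py sdp br out) := by unfold Spec_set_bitrate_py; infer_instance

-- ===== CLAIM (what is proved, stated in full; the proofs are below) =====
def Claim_equal_set_bitrate_py : Prop := ∀ (sdp : String) (br : Int), Dom_set_bitrate_py sdp br → Spec_set_bitrate_py sdp br (set_bitrate_py sdp br)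

-- ===== LEMMAS AND PROOFS =====

-- the common specification of both line-level transformations
def pvGold (tias asl : String) : List String → List String
  | [] => []
  | l :: rest =>
    if PySem.Str.startswith l "m=video" then
      l :: tias :: asl :: rest.dropWhile (fun s => PySem.Str.startswith s "b=")
    else l :: pvGold tias asl rest

-- A's core, as a function of the split lines
def pvAcore (tias asl : String) (ls : List String) : List String :=
  let idx := pvNextIdx ls 0
  if idx ≠ -1 then
    let i := idx + 1
    PySem.List.insert (PySem.List.insert (pvPopLoop ls i) i tias) (i + 1) asl
  else ls

theorem pvNextIdx_lb (ls : List String) (i : Int) :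
    pvNextIdx ls i = -1 ∨ i ≤ pvNextIdx ls i := by
  induction ls generalizing i with
  | nil => left; rfl
  | cons l rest ih =>
    by_cases hp : PySem.Chars.startswith l.toList ['m', '=', 'v', 'i', 'd', 'e', 'o'] = true
    · right; simp [pvNextIdx, hp]
    · rcases ih (i + 1) with h | h
      · left; simp [pvNextIdx, hp, h]
      · right; simp only [pvNextIdx, PySem.Str.startswith_eq,
          show "m=video".toList = ['m', '=', 'v', 'i', 'd', 'e', 'o'] from rfl, hp,
          if_false, Bool.false_eq_true]; omega

theorem pvNextIdx_shift (ls : List String) (i : Int) :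
    pvNextIdx ls i = if pvNextIdx ls 0 = -1 then -1 else pvNextIdx ls 0 + i := by
  induction ls generalizing i with
  | nil => simp [pvNextIdx]
  | cons l rest ih =>
    by_cases hp : PySem.Chars.startswith l.toList ['m', '=', 'v', 'i', 'd', 'e', 'o'] = true
    · simp [pvNextIdx, hp]
    · have h0 := ih 1
      have h1 := ih (i + 1)
      have hlb := pvNextIdx_lb rest 0
      simp only [pvNextIdx, PySem.Str.startswith_eq,
        show "m=video".toList = ['m', '=', 'v', 'i', 'd', 'e', 'o'] from rfl, hp,
        if_false, Bool.false_eq_true] at *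
      by_cases hm : pvNextIdx rest 0 = -1
      · simp [hm] at *; omega
      · simp [hm] at *; omega

theorem pvNextIdx_cases (ls : List String) :
    pvNextIdx ls 0 = -1 ∨ ∃ j : Nat, pvNextIdx ls 0 = (j : Int) ∧ j < ls.length := by
  induction ls with
  | nil => left; rfl
  | cons l rest ih =>
    by_cases hp : PySem.Chars.startswith l.toList ['m', '=', 'v', 'i', 'd', 'e', 'o'] = true
    · right; exact ⟨0, by simp [pvNextIdx, hp], by simp⟩
    · have hs := pvNextIdx_shift rest 1
      have hc : pvNextIdx (l :: rest) 0 = pvNextIdx rest 1 := by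
        simp [pvNextIdx, hp]
      rcases ih with h | ⟨j, hj, hjl⟩
      · left; rw [hc, hs, h]; simp
      · right
        exact ⟨j + 1, by rw [hc, hs, hj]; push_cast; omega, by simp only [List.length_cons]; omega⟩

theorem pvPopLoop_eq (ls : List String) (k : Nat) (hk : k ≤ ls.length) :
    pvPopLoop ls (k : Int) =
      ls.take k ++ (ls.drop k).dropWhile (fun s => PySem.Str.startswith s "b=") := by
  rw [pvPopLoop]
  by_cases hc : (k : Int) < (ls.length : Int) ∧
      (match PySem.List.pyGet? ls (k : Int) with
       | some l => PySem.Str.startswith l "b="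
       | none => false) = true
  · rw [if_pos hc]
    obtain ⟨hlt', hq⟩ := hc
    have hlt : k < ls.length := by exact_mod_cast hlt'
    rw [PySem.List.pyGet?_natCast, List.getElem?_eq_getElem hlt] at hq
    simp only at hq
    rw [PySem.List.pop?_natCast ls k hlt]
    show pvPopLoop (ls.eraseIdx k) (k : Int) =
      ls.take k ++ (ls.drop k).dropWhile (fun s => PySem.Str.startswith s "b=")
    have hrec := pvPopLoop_eq (ls.eraseIdx k) k
      (by rw [List.length_eraseIdx_of_lt hlt]; omega)
    rw [hrec, List.eraseIdx_eq_take_drop_succ]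
    have htk : (ls.take k ++ ls.drop (k + 1)).take k = ls.take k := by
      rw [List.take_append_of_le_length (by simp; omega), List.take_take]
      simp
    have hdk : (ls.take k ++ ls.drop (k + 1)).drop k = ls.drop (k + 1) := by
      rw [List.drop_append_of_le_length (by simp; omega)]
      simp
    rw [htk, hdk, List.drop_eq_getElem_cons hlt, List.dropWhile_cons_of_pos (by simpa using hq)]
  · rw [if_neg hc]
    push Not at hc
    by_cases hlt : k < ls.length
    · have hq := hc (by exact_mod_cast hlt)
      rw [PySem.List.pyGet?_natCast, List.getElem?_eq_getElem hlt] at hq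
      simp only at hq
      rw [List.drop_eq_getElem_cons hlt, List.dropWhile_cons_of_neg (by simpa using hq),
        ← List.drop_eq_getElem_cons hlt, List.take_append_drop]
    · have hke : k = ls.length := by omega
      subst hke
      simp
termination_by ls.length
decreasing_by rw [List.length_eraseIdx_of_lt hlt]; omega

theorem pvInsert_cons_succ (x : String) (xs : List String) (k : Nat) (v : String)
    (h : k ≤ xs.length) :
    PySem.List.insert (x :: xs) (((k + 1 : Nat)) : Int) v = x :: PySem.List.insert xs (k : Int) v := by
  rw [PySem.List.insert_natCast _ (k + 1) _ (by simp; omega), PySem.List.insert_natCast _ k _ h]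
  simp

theorem pvAcore_eq_gold (tias asl : String) (ls : List String) :
    pvAcore tias asl ls = pvGold tias asl ls := by
  induction ls with
  | nil => simp [pvAcore, pvNextIdx, pvGold]
  | cons l rest ih =>
    by_cases hp : PySem.Chars.startswith l.toList ['m', '=', 'v', 'i', 'd', 'e', 'o'] = true
    · have hidx : pvNextIdx (l :: rest) 0 = 0 := by simp [pvNextIdx, hp]
      unfold pvAcore
      rw [hidx, if_pos (by omega)]
      show PySem.List.insert (PySem.List.insert (pvPopLoop (l :: rest) ((0 : Int) + 1))
        ((0 : Int) + 1) tias) (((0 : Int) + 1) + 1) asl = pvGold tias asl (l :: rest)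
      rw [show (0 : Int) + 1 = ((1 : Nat) : Int) from rfl,
        pvPopLoop_eq (l :: rest) 1 (by simp)]
      simp only [List.take_succ_cons, List.take_zero, List.drop_succ_cons, List.drop_zero,
        List.singleton_append]
      rw [show ((1 : Nat) : Int) = (((0 : Nat) + 1 : Nat) : Int) from rfl]
      rw [pvInsert_cons_succ _ _ 0 _ (by simp)]
      rw [show (((0 + 1 : Nat) : Int)) + 1 = (((0 + 1 : Nat) + 1 : Nat) : Int) from by norm_num]
      rw [pvInsert_cons_succ _ _ (0 + 1) _ (by simp [PySem.List.length_insert])]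
      rw [show (((0 : Nat)) : Int) = (0 : Int) from by norm_num]
      rw [PySem.List.insert_zero]
      rw [show (((0 + 1 : Nat)) : Int) = (((0 : Nat) + 1 : Nat) : Int) from rfl]
      rw [pvInsert_cons_succ _ _ 0 _ (by simp)]
      rw [show (((0 : Nat)) : Int) = (0 : Int) from by norm_num]
      rw [PySem.List.insert_zero]
      simp [pvGold, hp]
    · have hc : pvNextIdx (l :: rest) 0 = pvNextIdx rest 1 := by simp [pvNextIdx, hp]
      rcases pvNextIdx_cases rest with h | ⟨j, hj, hjl⟩
      · have hneg : pvNextIdx (l :: rest) 0 = -1 := by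
          rw [hc, pvNextIdx_shift, h]; simp
        have hr : pvAcore tias asl rest = rest := by
          unfold pvAcore; rw [h]; simp
        have hg : pvGold tias asl rest = rest := by rw [← ih, hr]
        unfold pvAcore
        rw [hneg]
        simp [pvGold, hp, hg]
      · have hj0 : (0 : Int) ≤ (j : Int) := by positivity
        have hidx : pvNextIdx (l :: rest) 0 = ((j + 1 : Nat) : Int) := by
          rw [hc, pvNextIdx_shift, hj, if_neg (by omega)]; push_cast; ring
        have hlen : (pvPopLoop rest ((j + 1 : Nat) : Int)).length ≥ j + 1 := by
          rw [pvPopLoop_eq rest (j + 1) (by omega)]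
          simp
          omega
        have hAr : pvAcore tias asl rest =
            PySem.List.insert (PySem.List.insert (pvPopLoop rest (((j + 1 : Nat) : Int)))
              (((j + 1 : Nat) : Int)) tias) ((((j + 1 : Nat) : Int)) + 1) asl := by
          unfold pvAcore
          rw [hj, if_pos (by omega)]
          show PySem.List.insert (PySem.List.insert (pvPopLoop rest ((j : Int) + 1))
            ((j : Int) + 1) tias) (((j : Int) + 1) + 1) asl = _
          rw [show ((j : Int) + 1) = ((j + 1 : Nat) : Int) from by push_cast; ring]
        unfold pvAcore
        rw [hidx, if_pos (by push_cast; omega)]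
        show PySem.List.insert (PySem.List.insert
          (pvPopLoop (l :: rest) (((j + 1 : Nat) : Int) + 1))
          (((j + 1 : Nat) : Int) + 1) tias) ((((j + 1 : Nat) : Int) + 1) + 1) asl =
          pvGold tias asl (l :: rest)
        have hpop : pvPopLoop (l :: rest) (((j + 1 : Nat) : Int) + 1) =
            l :: pvPopLoop rest ((j + 1 : Nat) : Int) := by
          rw [show (((j + 1 : Nat) : Int) + 1) = ((j + 2 : Nat) : Int) from by push_cast; ring,
            pvPopLoop_eq (l :: rest) (j + 2) (by simp; omega),
            pvPopLoop_eq rest (j + 1) (by omega)]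
          simp [List.take_succ_cons, List.drop_succ_cons]
        rw [hpop,
          show (((j + 1 : Nat) : Int) + 1) = (((j + 1 : Nat) + 1 : Nat) : Int) from by push_cast; ring,
          pvInsert_cons_succ _ _ (j + 1) _ (by omega),
          show ((((j + 1 : Nat) + 1 : Nat) : Int) + 1) = (((j + 2 : Nat) + 1 : Nat) : Int) from by push_cast; ring,
          pvInsert_cons_succ _ _ (j + 2) _ (by rw [PySem.List.length_insert]; omega)]
        rw [show ((j + 2 : Nat) : Int) = ((j + 1 : Nat) : Int) + 1 from by push_cast; ring]
        simp only [pvGold, PySem.Str.startswith_eq,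
          show "m=video".toList = ['m', '=', 'v', 'i', 'd', 'e', 'o'] from rfl, hp,
          if_false, Bool.false_eq_true]
        rw [← ih, hAr]

theorem pvFold_done (tias asl : String) (ls out : List String) :
    (ls.foldl (pvAltStep tias asl) (out, true, false)).1 = out ++ ls := by
  induction ls generalizing out with
  | nil => simp
  | cons l rest ih => simp [pvAltStep, ih]

theorem pvFold_skip (tias asl : String) (ls out : List String) :
    (ls.foldl (pvAltStep tias asl) (out, true, true)).1 =
      out ++ ls.dropWhile (fun s => PySem.Str.startswith s "b=") := by
  induction ls generalizing out with
  | nil => simp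
  | cons l rest ih =>
    by_cases hq : PySem.Str.startswith l "b=" = true
    all_goals simp only [PySem.Str.startswith_eq,
      show "b=".toList = ['b', '='] from rfl] at hq
    · simp [pvAltStep, hq, ih]
    · simp [pvAltStep, hq, pvFold_done]

theorem pvFold_main (tias asl : String) (ls out : List String) :
    (ls.foldl (pvAltStep tias asl) (out, false, false)).1 = out ++ pvGold tias asl ls := by
  induction ls generalizing out with
  | nil => simp [pvGold]
  | cons l rest ih =>
    by_cases hp : PySem.Str.startswith l "m=video" = true
    all_goals simp only [PySem.Str.startswith_eq,
      show "m=video".toList = ['m', '=', 'v', 'i', 'd', 'e', 'o'] from rfl] at hp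
    · simp [pvAltStep, hp, pvGold, pvFold_skip]
    · simp [pvAltStep, hp, pvGold, ih]

-- ===== VERDICT (by name: the statement is the Claim_ definition above) =====
theorem set_bitrate_py_spec : Claim_equal_set_bitrate_py := by
  intro sdp br _
  show set_bitrate_py sdp br = set_bitrate_py_alt sdp br
  have hA : set_bitrate_py sdp br =
      PySem.Str.join "\r\n" (pvAcore ("b=TIAS:" ++ PySem.Int.toStr (br * 1000))
        ("b=AS:" ++ PySem.Int.toStr br) (PySem.Str.splitlines sdp)) := rfl
  have hB : set_bitrate_py_alt sdp br =
      PySem.Str.join "\r\n" (((PySem.Str.splitlines sdp).foldl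
        (pvAltStep ("b=TIAS:" ++ PySem.Int.toStr (br * 1000)) ("b=AS:" ++ PySem.Int.toStr br))
        ([], false, false)).1) := rfl
  rw [hA, hB, pvAcore_eq_gold, pvFold_main]
  simp
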